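-- pv_equiv track=rewrite | github.com/jensfinnas/bra_scraper | bra/modules/utils.py | get_basepoint
-- ===== SOURCE A (Python) =====
-- def get_basepoint(ll, chunk_size):
--     """ Get the index of the basepoint, that is the last
--         datapoint that fits in a single query
--     """
--     prev = 1
--     for i, l in enumerate(ll):
--         if prev * len(l) > chunk_size:
--             j = int(float(chunk_size) / float(prev))
--             return (i, j)
--         prev = prev * len(l)
--     return (len(ll), 0)
-- ===== SOURCE B (Python) =====
-- def get_basepoint(ll, chunk_size):
--     """ Get the index of the basepoint, that is the last
--         datapoint that fits in a single query
--     """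
--     # Build the prefix-product table of the row lengths first, then scan it.
--     prods = [1]
--     for l in ll:
--         prods.append(prods[-1] * len(l))
--     for k, (p, q) in enumerate(zip(prods, prods[1:])):
--         if q > chunk_size:
--             return (k, int(float(chunk_size) / float(p)))
--     return (len(ll), 0)
-- ===== Notes on version B (the rewrite author's own statement) =====
-- stated objective: alternative
-- what changed: Replaces A's fused single-pass running-product loop with early return by a build-then-search decomposition: first a prefix-product table of the row lengths, then a scan of adjacent table pairs for the first cumulative product exceeding chunk_size.
import Mathlib
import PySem

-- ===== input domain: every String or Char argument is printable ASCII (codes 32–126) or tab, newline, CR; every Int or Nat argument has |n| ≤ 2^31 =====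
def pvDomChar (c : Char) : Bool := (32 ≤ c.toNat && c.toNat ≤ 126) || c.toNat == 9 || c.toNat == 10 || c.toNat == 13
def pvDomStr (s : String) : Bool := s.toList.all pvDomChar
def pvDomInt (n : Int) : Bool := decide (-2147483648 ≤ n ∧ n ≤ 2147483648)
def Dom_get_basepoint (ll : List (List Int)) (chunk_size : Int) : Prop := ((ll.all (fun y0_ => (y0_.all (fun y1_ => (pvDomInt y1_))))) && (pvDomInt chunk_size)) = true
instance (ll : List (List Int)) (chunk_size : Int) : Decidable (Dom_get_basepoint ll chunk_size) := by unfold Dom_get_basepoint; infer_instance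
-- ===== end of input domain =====

-- B restructures A's fused running-product loop into a prefix-product table followed by a
-- scan of its adjacent pairs; the return value is identical on every input.
-- Python's `int(float(chunk_size) / float(prev))` is ported as floor division: whenever it is
-- reached, either chunk_size ≥ 0 and 1 ≤ prev ≤ max 1 chunk_size ≤ 2^31 (both floats exact,
-- quotient < 2^53 so rounding cannot cross an integer, and truncation = floor for a
-- nonnegative quotient), or chunk_size < 0 and prev = 1 (the quotient is the integer
-- chunk_size itself). So on Dom the port is exact.

-- ===== PORT A =====
-- the `for i, l in enumerate(ll)` loop of A, carrying the index i and the running product prev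
def pvALoop (chunk_size : Int) : List (List Int) → Nat → Int → Int × Int
  | [], i, _ => ((i : Int), 0)
  | l :: rest, i, prev =>
    if prev * (l.length : Int) > chunk_size then
      ((i : Int), PySem.Int.floordiv chunk_size prev)
    else
      pvALoop chunk_size rest (i + 1) (prev * (l.length : Int))

def get_basepoint (ll : List (List Int)) (chunk_size : Int) : Int × Int :=
  pvALoop chunk_size ll 0 1

-- ===== PORT B =====
-- `prods = [1]; for l in ll: prods.append(prods[-1] * len(l))` — the table after the head 1,
-- carrying the current last element of the table
def pvProds : List (List Int) → Int → List Int
  | [], _ => []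
  | l :: rest, cur => (cur * (l.length : Int)) :: pvProds rest (cur * (l.length : Int))

-- `for k, (p, q) in enumerate(zip(prods, prods[1:])): …` — the search over adjacent pairs
def pvScan2 (chunk_size : Int) : List (Int × Int) → Nat → Int × Int
  | [], k => ((k : Int), 0)
  | (p, q) :: rest, k =>
    if q > chunk_size then ((k : Int), PySem.Int.floordiv chunk_size p)
    else pvScan2 chunk_size rest (k + 1)

def get_basepoint_alt (ll : List (List Int)) (chunk_size : Int) : Int × Int :=
  let prods : List Int := 1 :: pvProds ll 1
  pvScan2 chunk_size (prods.zip prods.tail) 0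

-- ===== PRECONDITION & SPEC =====
def Spec_get_basepoint (ll : List (List Int)) (chunk_size : Int) (out : Int × Int) : Prop := out = get_basepoint_alt ll chunk_size
instance (ll : List (List Int)) (chunk_size : Int) (out : Int × Int) : Decidable (Spec_get_basepoint ll chunk_size out) := by unfold Spec_get_basepoint; infer_instance

-- ===== CLAIM (what is proved, stated in full; the proofs are below) =====
def Claim_equal_get_basepoint : Prop := ∀ (ll : List (List Int)) (chunk_size : Int), Dom_get_basepoint ll chunk_size → Spec_get_basepoint ll chunk_size (get_basepoint ll chunk_size)

-- ===== LEMMAS AND PROOFS =====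

-- Invariant: A's loop from state (k, prev) equals B's scan over the adjacent pairs of the
-- prefix-product table started at prev, with counter k.
theorem pvALoop_eq_scan (chunk_size : Int) (ll : List (List Int)) :
    ∀ (k : Nat) (prev : Int),
      pvALoop chunk_size ll k prev =
        pvScan2 chunk_size ((prev :: pvProds ll prev).zip (pvProds ll prev)) k := by
  induction ll with
  | nil => intro k prev; simp [pvALoop, pvProds, pvScan2]
  | cons l rest ih =>
      intro k prev
      simp only [pvALoop, pvProds, List.zip_cons_cons, pvScan2]
      split
      · rfl
      · exact ih (k + 1) (prev * (l.length : Int))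

-- ===== VERDICT (by name: the statement is the Claim_ definition above) =====
theorem get_basepoint_spec : Claim_equal_get_basepoint := by
  intro ll chunk_size _
  unfold Spec_get_basepoint get_basepoint get_basepoint_alt
  simpa using pvALoop_eq_scan chunk_size ll 0 1
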